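-- pv_equiv track=rewrite | github.com/orionw/LM-expansions | expansions/rerank.py | split_dict_into_chunks
-- ===== SOURCE A (Python) =====
-- from collections import OrderedDict
--
-- def split_dict_into_chunks(input_dict, num_chunks, keep_idx):
--     chunk_size = len(input_dict) // num_chunks
--     sorted_input = [(k, input_dict[k]) for k in sorted(input_dict.keys())]
--     ordered_dict = OrderedDict(sorted_input)
--     input_list = list(ordered_dict.items())
--
--     start = chunk_size * keep_idx
--     end = start + chunk_size if keep_idx < num_chunks - 1 else None
--     return dict(input_list[start:end])
-- ===== SOURCE B (Python) =====
-- def _select(items, lo, hi):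
--     # all items whose rank (by key) in the sorted order lies in [lo, hi), unsorted
--     if not items or hi <= lo or lo >= len(items):
--         return []
--     if lo <= 0 and hi >= len(items):
--         return items
--     p = items[len(items) // 2][0]
--     smaller = [kv for kv in items if kv[0] < p]
--     equal = [kv for kv in items if kv[0] == p]
--     bigger = [kv for kv in items if kv[0] > p]
--     a = len(smaller)
--     b = a + len(equal)
--     return (_select(smaller, lo, hi)
--             + equal[max(lo - a, 0):max(hi - a, 0)]
--             + _select(bigger, lo - b, hi - b))
--
-- def split_dict_into_chunks(input_dict, num_chunks, keep_idx):
--     items = list(input_dict.items())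
--     n = len(items)
--     chunk_size = n // num_chunks
--     start = chunk_size * keep_idx
--     stop = start + chunk_size if keep_idx < num_chunks - 1 else n
--     lo, hi, _ = slice(start, stop).indices(n)
--     return dict(sorted(_select(items, lo, hi), key=lambda kv: kv[0]))
-- ===== Notes on version B (the rewrite author's own statement) =====
-- stated objective: alternative
-- what changed: A sorts all keys and slices the chunk out of the fully sorted item list; B finds the chunk's members with a three-way-partition quickselect over the raw items (normalising the slice bounds with slice().indices) and sorts only that chunk.
import Mathlib
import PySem

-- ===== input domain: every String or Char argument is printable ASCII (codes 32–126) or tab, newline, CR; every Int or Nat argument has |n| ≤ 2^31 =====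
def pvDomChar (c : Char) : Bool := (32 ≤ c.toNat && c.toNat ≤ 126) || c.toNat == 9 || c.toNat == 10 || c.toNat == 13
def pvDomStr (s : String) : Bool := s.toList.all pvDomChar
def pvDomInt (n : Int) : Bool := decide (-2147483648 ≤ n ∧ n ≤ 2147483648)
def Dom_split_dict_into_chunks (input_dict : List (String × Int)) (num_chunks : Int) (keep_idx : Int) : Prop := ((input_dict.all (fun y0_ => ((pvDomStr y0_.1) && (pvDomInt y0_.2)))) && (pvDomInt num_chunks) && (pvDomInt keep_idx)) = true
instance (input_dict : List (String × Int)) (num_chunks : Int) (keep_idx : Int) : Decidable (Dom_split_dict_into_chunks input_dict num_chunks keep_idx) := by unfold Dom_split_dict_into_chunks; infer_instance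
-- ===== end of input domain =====

-- B replaces "sort everything, then slice out the chunk" by a three-way-partition quickselect that
-- extracts the chunk's members first and sorts only them ("alternative": structurally different,
-- not measured faster — CPython's C-coded sort outruns interpreted partitioning).

-- ===== PORT A =====
def split_dict_into_chunks (input_dict : List (String × Int)) (num_chunks : Int) (keep_idx : Int) : List (String × Int) :=
  let d := PySem.Dict.mk input_dict
  let chunk_size := PySem.Int.floordiv (input_dict.length : Int) num_chunks
  -- [(k, input_dict[k]) for k in sorted(input_dict.keys())]; every k is a key of d, so the
  -- lookup never raises and getD with a dummy default is exact
  let sorted_input := (PySem.List.sorted d.keys (fun k => k) false).map (fun k => (k, d.getD k 0))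
  let ordered_dict := PySem.Dict.ofList sorted_input
  let input_list := ordered_dict.items
  let start := chunk_size * keep_idx
  let stop? : Option Int := if keep_idx < num_chunks - 1 then some (start + chunk_size) else none
  (PySem.Dict.ofList (PySem.List.slice input_list (some start) stop?)).items

-- ===== PORT B =====
-- termination helpers for the quickselect recursion (filtering away the pivot shrinks the list)
theorem pv_filter_lt_of_mem_not {α : Type} {xs : List α} {p : α → Bool} {m : α}
    (hm : m ∈ xs) (h : p m = false) : (xs.filter p).length < xs.length := by
  rw [List.length_filter_lt_length_iff_exists]
  exact ⟨m, hm, by simp [h]⟩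

theorem pv_pivot_mem (items : List (String × Int)) (h : items ≠ []) :
    PySem.List.pyGetD items (PySem.Int.floordiv (items.length : Int) 2) ("", 0) ∈ items := by
  apply PySem.List.pyGetD_mem
  have hlen : 0 < items.length := List.length_pos_iff.mpr h
  rw [PySem.Int.floordiv_eq_ediv_of_pos (by omega)]
  constructor <;> omega

-- _select(items, lo, hi): the items whose rank (by key) in sorted order lies in [lo, hi), unsorted
def pvSelect (items : List (String × Int)) (lo hi : Int) : List (String × Int) :=
  if h1 : items = [] ∨ hi ≤ lo ∨ lo ≥ (items.length : Int) then []
  else if h2 : lo ≤ 0 ∧ hi ≥ (items.length : Int) then items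
  else
    let p := (PySem.List.pyGetD items (PySem.Int.floordiv (items.length : Int) 2) ("", 0)).1
    let smaller := items.filter (fun kv => decide (kv.1 < p))
    let equal := items.filter (fun kv => kv.1 == p)
    let bigger := items.filter (fun kv => decide (p < kv.1))
    let a : Int := (smaller.length : Int)
    let b : Int := a + (equal.length : Int)
    pvSelect smaller lo hi
      ++ PySem.List.slice equal (some (max (lo - a) 0)) (some (max (hi - a) 0))
      ++ pvSelect bigger (lo - b) (hi - b)
termination_by items.length
decreasing_by
  · simp only [List.length_unattach]
    have hm := pv_pivot_mem items (by tauto)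
    refine lt_of_lt_of_le (pv_filter_lt_of_mem_not (m := ⟨_, hm⟩) (List.mem_attach _ _) ?_) (by simp)
    simp
  · simp only [List.length_unattach]
    have hm := pv_pivot_mem items (by tauto)
    refine lt_of_lt_of_le (pv_filter_lt_of_mem_not (m := ⟨_, hm⟩) (List.mem_attach _ _) ?_) (by simp)
    simp

def split_dict_into_chunks_alt (input_dict : List (String × Int)) (num_chunks : Int) (keep_idx : Int) : List (String × Int) :=
  let items := input_dict
  let n : Int := (items.length : Int)
  let chunk_size := PySem.Int.floordiv n num_chunks
  let start := chunk_size * keep_idx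
  let stop := if keep_idx < num_chunks - 1 then start + chunk_size else n
  -- lo, hi, _ = slice(start, stop).indices(n): Python's slice-bound normalisation = clampIdx (exact)
  let lo := PySem.List.clampIdx items.length start
  let hi := PySem.List.clampIdx items.length stop
  (PySem.Dict.ofList (PySem.List.sorted (pvSelect items (lo : Int) (hi : Int)) (fun kv => kv.1) false)).items

-- ===== PRECONDITION & SPEC =====
-- Pre_ excludes num_chunks = 0, where A raises ZeroDivisionError, and association lists with
-- duplicate keys, which do not represent any Python dict (the declared argument type).
def Pre_split_dict_into_chunks (input_dict : List (String × Int)) (num_chunks : Int) (keep_idx : Int) : Prop :=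
  num_chunks ≠ 0 ∧ (input_dict.map Prod.fst).Nodup
instance (input_dict : List (String × Int)) (num_chunks : Int) (keep_idx : Int) : Decidable (Pre_split_dict_into_chunks input_dict num_chunks keep_idx) := by unfold Pre_split_dict_into_chunks; infer_instance
def pvWitness_split_dict_into_chunks : (List (String × Int)) × Int × Int := ([("a", 1), ("b", 2), ("c", 3)], 2, 0)

def Spec_split_dict_into_chunks (input_dict : List (String × Int)) (num_chunks : Int) (keep_idx : Int) (out : List (String × Int)) : Prop := out = split_dict_into_chunks_alt input_dict num_chunks keep_idx
instance (input_dict : List (String × Int)) (num_chunks : Int) (keep_idx : Int) (out : List (String × Int)) : Decidable (Spec_split_dict_into_chunks input_dict num_chunks keep_idx out) := by unfold Spec_split_dict_into_chunks; infer_instance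

-- ===== CLAIM (what is proved, stated in full; the proofs are below) =====
def Claim_equal_split_dict_into_chunks : Prop := ∀ (input_dict : List (String × Int)) (num_chunks : Int) (keep_idx : Int), Dom_split_dict_into_chunks input_dict num_chunks keep_idx → Pre_split_dict_into_chunks input_dict num_chunks keep_idx → Spec_split_dict_into_chunks input_dict num_chunks keep_idx (split_dict_into_chunks input_dict num_chunks keep_idx)

-- ===== LEMMAS AND PROOFS =====

-- a list of key-distinct pairs sorts into strictly key-increasing order
theorem pv_sorted_pairwise_lt (ys : List (String × Int)) (h : (ys.map Prod.fst).Nodup) :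
    (PySem.List.sorted ys (fun kv => kv.1) false).Pairwise (fun u v => u.1 < v.1) := by
  have hperm := PySem.List.sorted_perm ys (fun kv : String × Int => kv.1) false
  have hnd : ((PySem.List.sorted ys (fun kv : String × Int => kv.1) false).map Prod.fst).Nodup :=
    ((hperm.map Prod.fst).nodup_iff).mpr h
  have hne : (PySem.List.sorted ys (fun kv : String × Int => kv.1) false).Pairwise
      (fun u v => u.1 ≠ v.1) := List.pairwise_map.mp hnd
  exact ((PySem.List.sorted_pairwise ys (fun kv : String × Int => kv.1)).and hne).imp
    (fun hab => lt_of_le_of_ne hab.1 hab.2)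

theorem pv_pairwise_short {α : Type} {R : α → α → Prop} :
    ∀ (l : List α), l.length ≤ 1 → l.Pairwise R
  | [], _ => List.Pairwise.nil
  | [_], _ => by simp
  | _ :: _ :: _, h => by simp at h

-- among key-distinct pairs at most one has key p
theorem pv_filter_eq_short (xs : List (String × Int)) (p : String)
    (h : (xs.map Prod.fst).Nodup) : (xs.filter (fun kv => kv.1 == p)).length ≤ 1 := by
  have hnd : ((xs.filter (fun kv => kv.1 == p)).map Prod.fst).Nodup :=
    h.sublist (List.Sublist.map Prod.fst List.filter_sublist)
  have hmem : ∀ kv ∈ xs.filter (fun kv : String × Int => kv.1 == p), kv.1 = p := by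
    intro kv hkv
    simpa using (List.mem_filter.mp hkv).2
  match hE : xs.filter (fun kv : String × Int => kv.1 == p) with
  | [] => simp
  | [_] => simp
  | a :: b :: t =>
    exfalso
    rw [hE] at hnd hmem
    have h1 : a.1 = p := hmem a (by simp)
    have h2 : b.1 = p := hmem b (by simp)
    simp [List.nodup_cons] at hnd
    exact hnd.1.1 (by rw [h1, h2])

-- the three-way partition by a pivot key is a permutation of the list
theorem pv_partition_perm (pk : String) (xs : List (String × Int)) :
    (xs.filter (fun kv => decide (kv.1 < pk)) ++ (xs.filter (fun kv => kv.1 == pk)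
      ++ xs.filter (fun kv => decide (pk < kv.1)))).Perm xs := by
  rw [List.perm_iff_count]
  intro y
  simp only [List.count_append]
  have zlt : List.count y (xs.filter (fun kv : String × Int => decide (kv.1 < pk)))
      = if y.1 < pk then List.count y xs else 0 := by
    split_ifs with h
    · exact List.count_filter (decide_eq_true h)
    · exact List.count_eq_zero.mpr (fun hm => h (of_decide_eq_true (List.mem_filter.mp hm).2))
  have zeq : List.count y (xs.filter (fun kv : String × Int => kv.1 == pk))
      = if y.1 = pk then List.count y xs else 0 := by
    split_ifs with h
    · exact List.count_filter (by simpa using h)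
    · exact List.count_eq_zero.mpr (fun hm => h (by simpa using (List.mem_filter.mp hm).2))
  have zgt : List.count y (xs.filter (fun kv : String × Int => decide (pk < kv.1)))
      = if pk < y.1 then List.count y xs else 0 := by
    split_ifs with h
    · exact List.count_filter (decide_eq_true h)
    · exact List.count_eq_zero.mpr (fun hm => h (of_decide_eq_true (List.mem_filter.mp hm).2))
  rw [zlt, zeq, zgt]
  rcases lt_trichotomy y.1 pk with h | h | h
  · simp [h, ne_of_lt h, lt_asymm h]
  · simp [h]
  · simp [h, (ne_of_lt h).symm, lt_asymm h]

-- a drop/take segment distributes over an append (Nat-truncated indices)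
theorem pv_seg_append {α : Type} (u v : List α) (i j : Nat) :
    ((u ++ v).drop i).take (j - i) =
      (u.drop i).take (j - i)
        ++ (v.drop (i - u.length)).take ((j - u.length) - (i - u.length)) := by
  rw [List.drop_append, List.take_append]
  congr 2
  rw [List.length_drop]
  omega

-- quickselect extracts exactly the [lo, hi) segment of the sorted order (as a multiset)
theorem pv_select_perm : ∀ (N : Nat) (xs : List (String × Int)) (lo hi : Int),
    xs.length ≤ N → (xs.map Prod.fst).Nodup →
    (pvSelect xs lo hi).Perm
      (((PySem.List.sorted xs (fun kv => kv.1) false).drop lo.toNat).take (hi.toNat - lo.toNat)) := by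
  intro N
  induction N with
  | zero =>
    intro xs lo hi hlen _hnd
    have hxs : xs = [] := List.eq_nil_of_length_eq_zero (by omega)
    subst hxs
    rw [pvSelect.eq_def]
    simp
  | succ n ih =>
    intro xs lo hi hlen hnd
    rw [pvSelect.eq_def]
    split_ifs with hc1 hc2
    · -- empty result branch
      rcases hc1 with h | h | h
      · subst h; simp
      · have ht : hi.toNat - lo.toNat = 0 := by omega
        rw [ht]
        simp
      · have ht : (PySem.List.sorted xs (fun kv : String × Int => kv.1) false).length ≤ lo.toNat := by
          rw [PySem.List.length_sorted]; omega
        rw [List.drop_eq_nil_of_le ht]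
        simp
    · -- whole-list branch
      obtain ⟨hlo, hhi⟩ := hc2
      have h0 : lo.toNat = 0 := by omega
      rw [h0, List.drop_zero,
        List.take_of_length_le (by rw [PySem.List.length_sorted]; omega)]
      exact (PySem.List.sorted_perm xs _ false).symm
    · -- partition branch
      dsimp only
      set P := (PySem.List.pyGetD xs (PySem.Int.floordiv (xs.length : Int) 2) ("", 0)).1 with hP
      set L := xs.filter (fun kv => decide (kv.1 < P)) with hLdef
      set E := xs.filter (fun kv : String × Int => kv.1 == P) with hEdef
      set G := xs.filter (fun kv => decide (P < kv.1)) with hGdef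
      have hxne : xs ≠ [] := by tauto
      have hm := pv_pivot_mem xs hxne
      have hndL : (L.map Prod.fst).Nodup := hnd.sublist (List.Sublist.map Prod.fst List.filter_sublist)
      have hndG : (G.map Prod.fst).Nodup := hnd.sublist (List.Sublist.map Prod.fst List.filter_sublist)
      have hlenL : L.length < xs.length := pv_filter_lt_of_mem_not hm (by simp [hP])
      have hlenG : G.length < xs.length := pv_filter_lt_of_mem_not hm (by simp [hP])
      have ihL := ih L lo hi (by omega) hndL
      have ihG := ih G (lo - ((L.length : Int) + (E.length : Int)))
        (hi - ((L.length : Int) + (E.length : Int))) (by omega) hndG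
      -- the sorted list decomposes along the partition
      have hE : PySem.List.sorted E (fun kv : String × Int => kv.1) false = E :=
        PySem.List.sorted_eq_self_of_pairwise E _
          (pv_pairwise_short E (pv_filter_eq_short xs P hnd))
      have hS : PySem.List.sorted xs (fun kv : String × Int => kv.1) false
          = PySem.List.sorted L (fun kv : String × Int => kv.1) false
            ++ (E ++ PySem.List.sorted G (fun kv : String × Int => kv.1) false) := by
        apply PySem.List.sorted_eq_of_perm_of_pairwise_lt
        · exact ((PySem.List.sorted_perm L _ false).append
            ((List.Perm.refl E).append (PySem.List.sorted_perm G _ false))).trans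
            (pv_partition_perm P xs)
        · refine List.pairwise_append.mpr ⟨pv_sorted_pairwise_lt L hndL,
            List.pairwise_append.mpr ⟨pv_pairwise_short E (pv_filter_eq_short xs P hnd),
              pv_sorted_pairwise_lt G hndG, ?_⟩, ?_⟩
          · intro a haE b hbG
            have ha : a.1 = P := by simpa using (List.mem_filter.mp haE).2
            have hb : P < b.1 := by
              simpa using (List.mem_filter.mp ((PySem.List.mem_sorted G _ false b).mp hbG)).2
            rw [ha]; exact hb
          · intro a haL b hbEG
            have ha : a.1 < P := by
              simpa using (List.mem_filter.mp ((PySem.List.mem_sorted L _ false a).mp haL)).2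
            rcases List.mem_append.mp hbEG with hbE | hbG
            · have hb : b.1 = P := by simpa using (List.mem_filter.mp hbE).2
              rw [hb]; exact ha
            · have hb : P < b.1 := by
                simpa using (List.mem_filter.mp ((PySem.List.mem_sorted G _ false b).mp hbG)).2
              exact ha.trans hb
      rw [hS, pv_seg_append, pv_seg_append, List.append_assoc]
      simp only [PySem.List.length_sorted]
      -- middle piece: the Python slice of E is exactly its segment
      have hmid : PySem.List.slice E (some (max (lo - (L.length : Int)) 0))
            (some (max (hi - (L.length : Int)) 0))
          = (E.drop (lo.toNat - L.length)).take ((hi.toNat - L.length) - (lo.toNat - L.length)) := by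
        rw [PySem.List.slice_toNat E (le_max_right _ _) (le_max_right _ _)]
        have e1 : (max (lo - (L.length : Int)) 0).toNat = lo.toNat - L.length := by omega
        have e2 : (max (hi - (L.length : Int)) 0).toNat
            = (hi.toNat - L.length) - (lo.toNat - L.length) + (lo.toNat - L.length) := by omega
        rw [e1, e2]
        congr 1
        omega
      -- right piece: shift the recursion's bounds into segment indices
      have e3 : (lo - ((L.length : Int) + (E.length : Int))).toNat
          = (lo.toNat - L.length) - E.length := by omega
      have e4 : (hi - ((L.length : Int) + (E.length : Int))).toNat
          - (lo - ((L.length : Int) + (E.length : Int))).toNat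
          = ((hi.toNat - L.length) - E.length) - ((lo.toNat - L.length) - E.length) := by omega
      rw [e4, e3] at ihG
      refine ihL.append (List.Perm.append ?_ ihG)
      rw [hmid]

-- ===== VERDICT (by name: the statement is the Claim_ definition above) =====
theorem split_dict_into_chunks_spec : Claim_equal_split_dict_into_chunks := by
  intro input_dict num_chunks keep_idx _hdom hpre
  obtain ⟨_hnc, hnd⟩ := hpre
  unfold Spec_split_dict_into_chunks split_dict_into_chunks split_dict_into_chunks_alt
  dsimp only
  have hkeysnd : (PySem.Dict.mk input_dict).keys.Nodup := hnd
  -- A's comprehension over the sorted keys is sorted(items) by key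
  have hstep : (PySem.List.sorted (PySem.Dict.mk input_dict).keys (fun k => k) false).map
        (fun k => (k, (PySem.Dict.mk input_dict).getD k 0))
      = PySem.List.sorted input_dict (fun kv : String × Int => kv.1) false := by
    symm
    apply PySem.List.sorted_eq_of_perm_of_pairwise_lt
    · have hit := PySem.Dict.items_eq_map_keys (PySem.Dict.mk input_dict) hkeysnd 0
      have hp : ((PySem.List.sorted (PySem.Dict.mk input_dict).keys (fun k : String => k) false).map
            (fun k => (k, (PySem.Dict.mk input_dict).getD k 0))).Perm
          ((PySem.Dict.mk input_dict).keys.map (fun k => (k, (PySem.Dict.mk input_dict).getD k 0))) :=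
        (PySem.List.sorted_perm _ _ _).map _
      rw [← hit] at hp
      exact hp
    · have hperm := PySem.List.sorted_perm (PySem.Dict.mk input_dict).keys (fun k : String => k) false
      have hnd2 : (PySem.List.sorted (PySem.Dict.mk input_dict).keys (fun k : String => k) false).Nodup :=
        hperm.nodup_iff.mpr hkeysnd
      have hkp : (PySem.List.sorted (PySem.Dict.mk input_dict).keys (fun k : String => k) false).Pairwise (· < ·) :=
        ((PySem.List.sorted_pairwise _ (fun k : String => k)).and hnd2).imp
          (fun hab => lt_of_le_of_ne hab.1 hab.2)
      simpa [List.pairwise_map] using hkp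
  have hSnd : ((PySem.List.sorted input_dict (fun kv : String × Int => kv.1) false).map Prod.fst).Nodup :=
    ((PySem.List.sorted_perm input_dict _ false).map Prod.fst).nodup_iff.mpr hnd
  -- OrderedDict over key-distinct pairs keeps the list unchanged
  have hOD : (PySem.Dict.ofList (PySem.List.sorted input_dict (fun kv : String × Int => kv.1) false)).items
      = PySem.List.sorted input_dict (fun kv : String × Int => kv.1) false := by
    have hfresh : ∀ a ∈ PySem.List.sorted input_dict (fun kv : String × Int => kv.1) false,
        (PySem.Dict.empty : PySem.Dict String Int).contains a.1 = false := fun a _ => rfl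
    have h := PySem.Dict.items_foldl_insert_fresh
      (PySem.List.sorted input_dict (fun kv : String × Int => kv.1) false)
      (fun a => a.1) (fun a => a.2) PySem.Dict.empty hfresh (by simpa using hSnd)
    simpa using h
  -- B's sorted selection is the segment of the sorted list
  have hmk : ∀ (u v : Int),
      PySem.List.sorted (pvSelect input_dict ((PySem.List.clampIdx input_dict.length u : Nat) : Int)
          ((PySem.List.clampIdx input_dict.length v : Nat) : Int)) (fun kv : String × Int => kv.1) false
        = ((PySem.List.sorted input_dict (fun kv : String × Int => kv.1) false).drop
            (PySem.List.clampIdx input_dict.length u)).take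
            (PySem.List.clampIdx input_dict.length v - PySem.List.clampIdx input_dict.length u) := by
    intro u v
    have hsel := pv_select_perm input_dict.length input_dict
      ((PySem.List.clampIdx input_dict.length u : Nat) : Int)
      ((PySem.List.clampIdx input_dict.length v : Nat) : Int) le_rfl hnd
    simp only [Int.toNat_natCast] at hsel
    apply PySem.List.sorted_eq_of_perm_of_pairwise_lt
    · exact hsel.symm
    · exact List.Pairwise.sublist ((List.take_sublist _ _).trans (List.drop_sublist _ _))
        (pv_sorted_pairwise_lt input_dict hnd)
  -- A's Python slice of the sorted list is the same segment
  have hAslice : ∀ (u v : Int),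
      PySem.List.slice (PySem.List.sorted input_dict (fun kv : String × Int => kv.1) false) (some u) (some v)
        = ((PySem.List.sorted input_dict (fun kv : String × Int => kv.1) false).drop
            (PySem.List.clampIdx input_dict.length u)).take
            (PySem.List.clampIdx input_dict.length v - PySem.List.clampIdx input_dict.length u) := by
    intro u v
    simp [PySem.List.slice, PySem.List.length_sorted]
  rw [hstep, hOD]
  by_cases hki : keep_idx < num_chunks - 1
  · simp only [if_pos hki]
    rw [hmk, hAslice]
  · simp only [if_neg hki]
    rw [hmk, PySem.List.slice_some_none]
    have hnn : PySem.List.clampIdx input_dict.length ((input_dict.length : Nat) : Int)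
        = input_dict.length := by
      simp [PySem.List.clampIdx]
    rw [hnn, List.take_of_length_le (by simp [PySem.List.length_sorted])]
    simp only [PySem.List.length_sorted]
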